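-- pv_equiv track=rewrite | github.com/bale2manos/Optimal-Route-Planner | beautiful-output.py | create_empty_grid
-- ===== SOURCE A (Python) =====
-- def create_empty_grid(num_rows, num_columns):
--     grid = []
--     cell = True
--     row = True
--     for i in range(2 * num_rows - 1):
--         grid.append([])
--         cell = True
--         for j in range(2 * num_columns - 1):
--             if row:
--                 if cell:
--                     grid[i].append('.')
--                 else:
--                     grid[i].append(' ')
--                 cell = not cell
--             else:
--                 grid[i].append(' ')
--         row = not row
--     return grid
-- ===== SOURCE B (Python) =====
-- def create_empty_grid(num_rows, num_columns):
--     # Tile the two-cell period ['.', ' '] and the two-row period [dotted, blank]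
--     # by list multiplication, then slice off the trailing separator; an empty
--     # grid returns early. No per-cell or per-row flags.
--     if 2 * num_rows - 1 <= 0:
--         return []
--     dotted = (['.', ' '] * num_columns)[:2 * num_columns - 1]
--     blank = [' '] * (2 * num_columns - 1)
--     return [row[:] for row in ([dotted, blank] * num_rows)[:2 * num_rows - 1]]
-- ===== Notes on version B (the rewrite author's own statement) =====
-- stated objective: alternative
-- what changed: Replaces A's per-cell boolean state machine (nested loops toggling cell/row flags while appending cell by cell) with sequence tiling: repeat the two-cell period ['.',' '] and the two-row period [dotted, blank] by list multiplication and slice off the trailing separator; an empty grid returns early; no flags or conditionals remain.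
import Mathlib
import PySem

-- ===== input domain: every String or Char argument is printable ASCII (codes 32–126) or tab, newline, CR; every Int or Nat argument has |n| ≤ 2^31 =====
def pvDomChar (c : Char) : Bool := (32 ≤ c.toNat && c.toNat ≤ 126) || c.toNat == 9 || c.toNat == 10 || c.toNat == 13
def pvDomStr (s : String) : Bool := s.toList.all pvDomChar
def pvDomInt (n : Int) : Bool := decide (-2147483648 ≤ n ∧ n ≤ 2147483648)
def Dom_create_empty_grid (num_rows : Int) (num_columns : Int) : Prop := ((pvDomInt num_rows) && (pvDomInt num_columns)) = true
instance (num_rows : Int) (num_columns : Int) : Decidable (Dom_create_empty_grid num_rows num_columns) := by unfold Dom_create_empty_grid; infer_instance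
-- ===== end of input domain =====

-- B replaces A's nested loops with toggling booleans by tiling the two-element
-- period (list repetition) and truncating the trailing separator with a slice;
-- same asymptotic cost, different decomposition (no flags, no conditionals).

-- ===== PORT A =====
-- A: nested loops with toggling `row` and `cell` booleans, appending cell by cell.
-- outer state: (grid so far, row flag); inner state: (current row so far, cell flag).
def create_empty_grid (num_rows : Int) (num_columns : Int) : List (List String) :=
  ((PySem.List.pyRange 0 (2 * num_rows - 1) 1).foldl
    (fun (st : List (List String) × Bool) _i =>
      let inner :=
        (PySem.List.pyRange 0 (2 * num_columns - 1) 1).foldl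
          (fun (r : List String × Bool) _j =>
            if st.2 then
              (r.1 ++ [if r.2 then "." else " "], !r.2)
            else
              (r.1 ++ [" "], r.2))
          ([], true)
      (st.1 ++ [inner.1], !st.2))
    ([], true)).1

-- ===== PORT B =====
-- B: (['.', ' '] * num_columns)[:2*num_columns-1], [' ']*(2*num_columns-1),
-- then ([dotted, blank] * num_rows)[:2*num_rows-1] with a fresh copy per row
-- (row[:] is the identity on immutable Lean lists).
def create_empty_grid_alt (num_rows : Int) (num_columns : Int) : List (List String) :=
  if 2 * num_rows - 1 ≤ 0 then []
  else
  let dotted := PySem.List.slice (PySem.List.pyRepeat [".", " "] num_columns)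
                  none (some (2 * num_columns - 1))
  let blank := PySem.List.pyRepeat [" "] (2 * num_columns - 1)
  (PySem.List.slice (PySem.List.pyRepeat [dotted, blank] num_rows)
      none (some (2 * num_rows - 1))).map
    (fun row => PySem.List.slice row none none)

-- ===== PRECONDITION & SPEC =====
def Spec_create_empty_grid (num_rows : Int) (num_columns : Int) (out : List (List String)) : Prop := out = create_empty_grid_alt num_rows num_columns
instance (num_rows : Int) (num_columns : Int) (out : List (List String)) : Decidable (Spec_create_empty_grid num_rows num_columns out) := by unfold Spec_create_empty_grid; infer_instance

-- ===== CLAIM (what is proved, stated in full; the proofs are below) =====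
def Claim_equal_create_empty_grid : Prop := ∀ (num_rows : Int) (num_columns : Int), Dom_create_empty_grid num_rows num_columns → Spec_create_empty_grid num_rows num_columns (create_empty_grid num_rows num_columns)

-- ===== LEMMAS AND PROOFS =====

-- alternating list of X/Y of length k, starting with X iff the flag is true
def patAlt {α : Type} (X Y : α) : Nat → Bool → List α
  | 0, _ => []
  | k+1, b => (if b then X else Y) :: patAlt X Y k (!b)

-- A's inner loop, dotted case: appends an alternating './ ' tail
theorem innerA_true (l : List Int) :
    ∀ (acc : List String) (c : Bool),
      (l.foldl (fun (r : List String × Bool) _ =>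
          (r.1 ++ [if r.2 then "." else " "], !r.2)) (acc, c)).1
        = acc ++ patAlt "." " " l.length c := by
  induction l with
  | nil => intro acc c; simp [patAlt]
  | cons x l ih =>
    intro acc c
    simp only [List.foldl_cons, List.length_cons, patAlt]
    rw [ih]
    simp

-- A's inner loop, space case: appends a run of spaces
theorem innerA_false (l : List Int) :
    ∀ (acc : List String) (c : Bool),
      (l.foldl (fun (r : List String × Bool) _ =>
          (r.1 ++ [" "], r.2)) (acc, c)).1
        = acc ++ List.replicate l.length " " := by
  induction l with
  | nil => intro acc c; simp
  | cons x l ih =>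
    intro acc c
    simp only [List.foldl_cons, List.length_cons]
    rw [ih]
    simp [List.replicate_succ]

-- A's outer loop: rows alternate between the dotted and the space template
theorem outerA (m : Int) (l : List Int) :
    ∀ (acc : List (List String)) (r : Bool),
      ((l.foldl
        (fun (st : List (List String) × Bool) _i =>
          let inner :=
            (PySem.List.pyRange 0 (2 * m - 1) 1).foldl
              (fun (rr : List String × Bool) _j =>
                if st.2 then
                  (rr.1 ++ [if rr.2 then "." else " "], !rr.2)
                else
                  (rr.1 ++ [" "], rr.2))
              ([], true)
          (st.1 ++ [inner.1], !st.2))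
        (acc, r)).1)
      = acc ++ patAlt (patAlt "." " " (PySem.List.pyRange 0 (2 * m - 1) 1).length true)
                      (List.replicate (PySem.List.pyRange 0 (2 * m - 1) 1).length " ")
                      l.length r := by
  induction l with
  | nil => intro acc r; simp [patAlt]
  | cons x l ih =>
    intro acc r
    simp only [List.foldl_cons, List.length_cons, patAlt]
    rw [ih]
    cases r with
    | true =>
      simp only [if_true, Bool.not_true]
      rw [innerA_true]
      simp
    | false =>
      simp only [Bool.false_eq_true, if_false, Bool.not_false]
      rw [innerA_false]
      simp

-- tiling a two-element period is the alternating pattern of even length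
theorem flatten_replicate_pair {α : Type} (X Y : α) (k : Nat) :
    (List.replicate k [X, Y]).flatten = patAlt X Y (2 * k) true := by
  induction k with
  | zero => simp [patAlt]
  | succ k ih =>
    simp [List.replicate_succ, patAlt, ih]

-- truncating an alternating pattern is the alternating pattern of min length
theorem take_patAlt {α : Type} (X Y : α) (k : Nat) :
    ∀ (j : Nat) (b : Bool), (patAlt X Y k b).take j = patAlt X Y (min j k) b := by
  induction k with
  | zero => intro j b; simp [patAlt]
  | succ k ih =>
    intro j b
    cases j with
    | zero => simp [patAlt]
    | succ j =>
      have hm : min (j + 1) (k + 1) = (min j k) + 1 := by omega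
      simp only [patAlt, List.take_succ_cons, hm, ih]

-- a slice of the empty list is empty
theorem slice_nil {α : Type} (a? b? : Option Int) :
    PySem.List.slice ([] : List α) a? b? = [] := by
  cases a? <;> cases b? <;>
    simp [PySem.List.slice, PySem.List.clampIdx]

-- B in pattern form
theorem altB (n m : Int) :
    create_empty_grid_alt n m
      = patAlt (patAlt "." " " (PySem.List.pyRange 0 (2 * m - 1) 1).length true)
               (List.replicate (PySem.List.pyRange 0 (2 * m - 1) 1).length " ")
               (PySem.List.pyRange 0 (2 * n - 1) 1).length true := by
  unfold create_empty_grid_alt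
  by_cases hg : 2 * n - 1 ≤ 0
  case pos =>
    rw [if_pos hg]
    have h0 : (PySem.List.pyRange 0 (2 * n - 1) 1).length = 0 := by
      simp [PySem.List.length_pyRange_one]; omega
    rw [h0]; rfl
  rw [if_neg hg]
  have hlenm : (PySem.List.pyRange 0 (2 * m - 1) 1).length = (2 * m - 1).toNat := by
    simp [PySem.List.length_pyRange_one]
  have hlenn : (PySem.List.pyRange 0 (2 * n - 1) 1).length = (2 * n - 1).toNat := by
    simp [PySem.List.length_pyRange_one]
  have hdot : PySem.List.slice (PySem.List.pyRepeat [(".":String), " "] m)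
        none (some (2 * m - 1))
      = patAlt "." " " (2 * m - 1).toNat true := by
    by_cases hm : 0 ≤ 2 * m - 1
    · rw [PySem.List.slice_to _ hm, PySem.List.pyRepeat, flatten_replicate_pair,
        take_patAlt]
      have : min (2 * m - 1).toNat (2 * m.toNat) = (2 * m - 1).toNat := by omega
      rw [this]
    · have hm0 : m.toNat = 0 := by omega
      have h0 : (2 * m - 1).toNat = 0 := by omega
      rw [PySem.List.pyRepeat, hm0]
      simp [slice_nil, h0, patAlt]
  have hblank : PySem.List.pyRepeat [(" ":String)] (2 * m - 1)
      = List.replicate (2 * m - 1).toNat " " := PySem.List.pyRepeat_singleton _ _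
  have hgrid : PySem.List.slice
        (PySem.List.pyRepeat [patAlt "." " " (2 * m - 1).toNat true,
                              List.replicate (2 * m - 1).toNat (" ":String)] n)
        none (some (2 * n - 1))
      = patAlt (patAlt "." " " (2 * m - 1).toNat true)
               (List.replicate (2 * m - 1).toNat " ") (2 * n - 1).toNat true := by
    by_cases hn : 0 ≤ 2 * n - 1
    · rw [PySem.List.slice_to _ hn, PySem.List.pyRepeat, flatten_replicate_pair,
        take_patAlt]
      have : min (2 * n - 1).toNat (2 * n.toNat) = (2 * n - 1).toNat := by omega
      rw [this]
    · have hn0 : n.toNat = 0 := by omega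
      have h0 : (2 * n - 1).toNat = 0 := by omega
      rw [PySem.List.pyRepeat, hn0]
      simp [slice_nil, h0, patAlt]
  simp only [hlenm, hlenn, hdot, hblank, hgrid, PySem.List.slice_none_none,
    List.map_id']

-- ===== VERDICT (by name: the statement is the Claim_ definition above) =====
theorem create_empty_grid_spec : Claim_equal_create_empty_grid := by
  intro n m _
  unfold Spec_create_empty_grid create_empty_grid
  rw [outerA, altB]
  simp
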